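-- pv_equiv track=rewrite | github.com/Miha258/labs | task2/main.py | find_last_positive
-- ===== SOURCE A (Python) =====
-- def find_last_positive(arr):
--     # Початкове число, якщо нічого не знайдено то поверне -1
--     last_positive = -1
--     # Перевертаєм список
--     reversed_arr = arr[::-1]
--     for num in reversed_arr:
--         # Провіряєм чи число більше 0, якщо ні, то провіряєм далі
--         if num > 0:
--             last_positive = num
--             break
--     return last_positive
-- ===== SOURCE B (Python) =====
-- def find_last_positive(arr):
--     last_positive = -1
--     for num in arr:
--         if num > 0:
--             last_positive = num
--     return last_positive
-- ===== Notes on version B (the rewrite author's own statement) =====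
-- stated objective: simpler
-- what changed: Replaces the reversed copy plus first-hit/break scan with a single forward pass keeping a running 'last positive seen' accumulator (no reversal, no break).
import Mathlib
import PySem

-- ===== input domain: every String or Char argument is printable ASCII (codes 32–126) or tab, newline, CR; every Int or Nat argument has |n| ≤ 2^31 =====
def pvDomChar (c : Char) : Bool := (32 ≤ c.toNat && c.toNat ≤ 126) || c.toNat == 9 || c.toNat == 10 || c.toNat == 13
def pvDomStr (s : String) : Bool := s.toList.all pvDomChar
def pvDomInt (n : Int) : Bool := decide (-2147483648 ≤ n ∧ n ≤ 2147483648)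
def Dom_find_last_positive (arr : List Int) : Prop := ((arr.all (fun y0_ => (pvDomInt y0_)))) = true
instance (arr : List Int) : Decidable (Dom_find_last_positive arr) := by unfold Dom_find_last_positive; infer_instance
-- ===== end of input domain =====

-- B replaces A's reversed copy + break scan by one forward pass with a running accumulator (simpler; same O(n)).

-- ===== PORT A =====
-- loop over reversed_arr with break: stops at the first num > 0
def pvLoopA : List Int → Int → Int
  | [], acc => acc
  | num :: rest, acc => if num > 0 then num else pvLoopA rest acc

def find_last_positive (arr : List Int) : Int :=
  let last_positive : Int := -1
  -- arr[::-1] (PySem.List.slice?_none_none_neg_one: this slice is the reverse)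
  let reversed_arr := arr.reverse
  pvLoopA reversed_arr last_positive

-- ===== PORT B =====
def find_last_positive_alt (arr : List Int) : Int :=
  arr.foldl (fun last_positive num => if num > 0 then num else last_positive) (-1)

-- ===== PRECONDITION & SPEC =====
def Spec_find_last_positive (arr : List Int) (out : Int) : Prop := out = find_last_positive_alt arr
instance (arr : List Int) (out : Int) : Decidable (Spec_find_last_positive arr out) := by unfold Spec_find_last_positive; infer_instance

-- ===== CLAIM (what is proved, stated in full; the proofs are below) =====
def Claim_equal_find_last_positive : Prop := ∀ (arr : List Int), Dom_find_last_positive arr → Spec_find_last_positive arr (find_last_positive arr)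

-- ===== LEMMAS AND PROOFS =====
theorem pvLoopA_append_singleton (l : List Int) (x acc : Int) :
    pvLoopA (l ++ [x]) acc = pvLoopA l (if x > 0 then x else acc) := by
  induction l with
  | nil => simp [pvLoopA]
  | cons n t ih => by_cases h : n > 0 <;> simp [pvLoopA, h, ih]

theorem pvLoopA_reverse_eq_foldl (l : List Int) (acc : Int) :
    pvLoopA l.reverse acc = l.foldl (fun a num => if num > 0 then num else a) acc := by
  induction l generalizing acc with
  | nil => rfl
  | cons n t ih =>
      simp only [List.reverse_cons, List.foldl_cons, pvLoopA_append_singleton]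
      exact ih _

-- ===== VERDICT (by name: the statement is the Claim_ definition above) =====
theorem find_last_positive_spec : Claim_equal_find_last_positive := by
  intro arr _
  show _ = _
  simp only [find_last_positive, find_last_positive_alt]
  exact pvLoopA_reverse_eq_foldl arr (-1)
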